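-- pv_equiv track=rewrite | github.com/dongseoki/Studying-algorithms | programmers/불량 사용자.py | checkBanned
-- ===== SOURCE A (Python) =====
-- def checkBanned(item1, banId):
--     if len(item1) != len(banId):
--         return False
--     for idx in range(len(item1)):
--         if item1[idx] == banId[idx] or banId[idx] == '*':
--             continue
--         else:
--             return False
--     return True
-- ===== SOURCE B (Python) =====
-- def checkBanned(item1, banId):
--     if len(item1) != len(banId):
--         return False
--     masked = list(item1)
--     for i, c in enumerate(banId):
--         if c == '*':
--             masked[i] = '*'
--     return ''.join(masked) == banId
-- ===== Notes on version B (the rewrite author's own statement) =====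
-- stated objective: alternative
-- what changed: Instead of A's positional accept/reject loop with early return, B builds a masked copy of item1 (overwriting every position where banId holds '*' with '*') and decides by a single whole-string equality masked == banId.
import Mathlib
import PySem

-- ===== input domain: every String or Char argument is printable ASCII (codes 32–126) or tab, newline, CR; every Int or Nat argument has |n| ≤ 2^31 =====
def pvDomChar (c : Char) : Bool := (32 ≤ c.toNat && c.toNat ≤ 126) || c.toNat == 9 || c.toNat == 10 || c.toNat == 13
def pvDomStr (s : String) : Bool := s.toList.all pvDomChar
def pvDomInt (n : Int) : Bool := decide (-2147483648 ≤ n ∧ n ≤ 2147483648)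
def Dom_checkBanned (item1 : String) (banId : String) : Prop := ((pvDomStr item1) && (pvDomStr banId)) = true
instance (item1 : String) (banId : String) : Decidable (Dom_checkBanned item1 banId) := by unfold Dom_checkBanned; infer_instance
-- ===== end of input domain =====

-- B replaces A's positional accept/reject loop by building a masked copy of item1
-- ('*' written over every position where banId has '*') and one whole-string equality (alternative, same cost).

-- ===== PORT A =====
-- the 'for idx in range(len(item1))' loop with early return False
def checkBannedGo (a b : List Char) (i : Nat) : Bool :=
  if _h : i < a.length then
    match PySem.List.pyGet? a (i : Int), PySem.List.pyGet? b (i : Int) with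
    | some x, some y => if x = y ∨ y = '*' then checkBannedGo a b (i + 1) else false
    | _, _ => false
  else true
termination_by a.length - i

def checkBanned (item1 : String) (banId : String) : Bool :=
  if PySem.Str.len item1 ≠ PySem.Str.len banId then false
  else checkBannedGo item1.toList banId.toList 0

-- ===== PORT B =====
def checkBanned_alt (item1 : String) (banId : String) : Bool :=
  if PySem.Str.len item1 ≠ PySem.Str.len banId then false
  else
    -- masked = list(item1); for i, c in enumerate(banId): if c == '*': masked[i] = '*'
    let masked := (PySem.List.enumerate banId.toList 0).foldl
      (fun m p => if p.2 = '*' then PySem.List.pySetD m p.1 '*' else m) item1.toList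
    -- ''.join(masked) == banId
    masked == banId.toList

-- ===== PRECONDITION & SPEC =====
def Spec_checkBanned (item1 : String) (banId : String) (out : Bool) : Prop := out = checkBanned_alt item1 banId
instance (item1 : String) (banId : String) (out : Bool) : Decidable (Spec_checkBanned item1 banId out) := by unfold Spec_checkBanned; infer_instance

-- ===== CLAIM (what is proved, stated in full; the proofs are below) =====
def Claim_equal_checkBanned : Prop := ∀ (item1 : String) (banId : String), Dom_checkBanned item1 banId → Spec_checkBanned item1 banId (checkBanned item1 banId)

-- ===== LEMMAS AND PROOFS =====

-- A's loop from index i computes all() of the remaining zipped pairs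
theorem checkBannedGo_eq (a b : List Char) (hlen : a.length = b.length) (i : Nat) :
    checkBannedGo a b i = ((a.zip b).drop i).all (fun p => p.2 == '*' || p.1 == p.2) := by
  by_cases h : i < a.length
  · have hz : i < (a.zip b).length := by simp [List.length_zip, hlen.symm ▸ h]; omega
    rw [checkBannedGo, dif_pos h]
    have ha : PySem.List.pyGet? a (i : Int) = some a[i] := by
      simp [PySem.List.pyGet?_natCast, List.getElem?_eq_getElem h]
    have hb' : i < b.length := hlen ▸ h
    have hb : PySem.List.pyGet? b (i : Int) = some b[i] := by
      simp [PySem.List.pyGet?_natCast, List.getElem?_eq_getElem hb']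
    rw [ha, hb]
    have hdrop : (a.zip b).drop i = (a.zip b)[i] :: (a.zip b).drop (i + 1) :=
      (List.drop_eq_getElem_cons hz).symm ▸ rfl
    rw [hdrop, List.all_cons]
    have hpair : (a.zip b)[i] = (a[i], b[i]) := List.getElem_zip
    rw [hpair]
    by_cases hc : a[i] = b[i] ∨ b[i] = '*'
    · have : (b[i] == '*' || a[i] == b[i]) = true := by
        rcases hc with hc | hc <;> simp [hc]
      simp only [if_pos hc, this, Bool.true_and]
      exact checkBannedGo_eq a b hlen (i + 1)
    · rw [not_or] at hc
      have : (b[i] == '*' || a[i] == b[i]) = false := by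
        simp [hc.1, hc.2]
      simp [hc, this]
  · have hnil : (a.zip b).drop i = [] :=
      List.drop_eq_nil_of_le (by simp [List.length_zip]; omega)
    rw [checkBannedGo, dif_neg h, hnil]
    simp
termination_by a.length - i

-- B's masking fold, started at offset s, rewrites the window a[s .. s+|b|) by zipWith
theorem mask_fold (b : List Char) (s : Nat) (a : List Char) (hs : s + b.length ≤ a.length) :
    (PySem.List.enumerate b (s : Int)).foldl
        (fun m p => if p.2 = '*' then PySem.List.pySetD m p.1 '*' else m) a
      = a.take s ++ List.zipWith (fun x y => if y = '*' then '*' else x) (a.drop s) b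
          ++ a.drop (s + b.length) := by
  induction b generalizing s a with
  | nil => simp [PySem.List.enumerate_nil]
  | cons c t ih =>
    have hsl : s < a.length := by simp at hs; omega
    have hcast : (s : Int) + 1 = ((s + 1 : Nat) : Int) := by push_cast; ring
    rw [PySem.List.enumerate_cons, List.foldl_cons]
    have hu : (if ((s : Int), c).2 = '*' then PySem.List.pySetD a ((s : Int), c).1 '*' else a)
        = a.take s ++ (if c = '*' then '*' else a[s]) :: a.drop (s + 1) := by
      simp only []
      split_ifs with hc
      · rw [PySem.List.pySetD_of_nonneg a '*' (by positivity)]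
        simp only [Int.toNat_natCast]
        rw [List.set_eq_take_append_cons_drop, if_pos hsl]
      · conv_lhs => rw [← List.take_append_drop s a, List.drop_eq_getElem_cons hsl]
    have hlenX : (a.take s).length = s := by simp; omega
    have hlen' : (a.take s ++ (if c = '*' then '*' else a[s]) :: a.drop (s + 1)).length
        = a.length := by simp [hlenX]; omega
    have hs' : (s + 1) + t.length
        ≤ (a.take s ++ (if c = '*' then '*' else a[s]) :: a.drop (s + 1)).length := by
      rw [hlen']; simp at hs; omega
    rw [hcast, hu, ih (s + 1) _ hs']
    have htake : (a.take s ++ (if c = '*' then '*' else a[s]) :: a.drop (s + 1)).take (s + 1)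
        = a.take s ++ [if c = '*' then '*' else a[s]] := by
      simp [List.take_append, hlenX]
    have hdrop1 : (a.take s ++ (if c = '*' then '*' else a[s]) :: a.drop (s + 1)).drop (s + 1)
        = a.drop (s + 1) := by
      simp [List.drop_append, hlenX]
    have hdrop2 : (a.take s ++ (if c = '*' then '*' else a[s]) :: a.drop (s + 1)).drop
          (s + 1 + t.length) = (a.drop (s + 1)).drop t.length := by
      rw [List.drop_append]
      have h1 : (a.take s).drop (s + 1 + t.length) = [] :=
        List.drop_eq_nil_of_le (by rw [hlenX]; omega)
      have h2 : s + 1 + t.length - (a.take s).length = t.length + 1 := by rw [hlenX]; omega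
      rw [h1, h2]
      simp
    have hdropa : a.drop s = a[s] :: a.drop (s + 1) := List.drop_eq_getElem_cons hsl
    have hdropend : a.drop (s + (c :: t).length) = (a.drop (s + 1)).drop t.length := by
      rw [List.drop_drop]
      congr 1
      simp; omega
    rw [htake, hdrop1, hdrop2, hdropa, hdropend, List.zipWith_cons_cons]
    simp only [List.cons_append, List.append_assoc, List.nil_append]

-- masked == b decides exactly all() over the zipped pairs (for equal lengths)
theorem zipWith_mask_eq (a b : List Char) (h : a.length = b.length) :
    (List.zipWith (fun x y => if y = '*' then '*' else x) a b == b)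
      = (a.zip b).all (fun p => p.2 == '*' || p.1 == p.2) := by
  induction a generalizing b with
  | nil => cases b with
    | nil => rfl
    | cons y ys => simp at h
  | cons x xs ih =>
    cases b with
    | nil => simp at h
    | cons y ys =>
      have h' : xs.length = ys.length := by simpa using h
      simp only [List.zipWith_cons_cons, List.zip_cons_cons, List.all_cons, List.cons_beq_cons]
      rw [ih ys h']
      by_cases hy : y = '*'
      · simp [hy]
      · have hbeq : (y == '*') = false := by simp [hy]
        rw [if_neg hy, hbeq, Bool.false_or]

-- ===== VERDICT (by name: the statement is the Claim_ definition above) =====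
theorem checkBanned_spec : Claim_equal_checkBanned := by
  intro item1 banId _
  unfold Spec_checkBanned checkBanned checkBanned_alt
  by_cases h : PySem.Str.len item1 = PySem.Str.len banId
  · have hlen : item1.toList.length = banId.toList.length := by
      have h' := h; simp [PySem.Str.len] at h'
      simpa [String.length_toList] using h'
    simp only [h, ne_eq, not_true_eq_false, if_false]
    have hm := mask_fold banId.toList 0 item1.toList (by omega)
    simp only [Nat.cast_zero, List.take_zero, List.drop_zero, Nat.zero_add,
      List.nil_append] at hm
    rw [← hlen, List.drop_length, List.append_nil] at hm
    rw [hm, zipWith_mask_eq _ _ hlen]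
    simpa using checkBannedGo_eq item1.toList banId.toList hlen 0
  · have hne : item1.length ≠ banId.length := by
      intro he; exact h (by simp [PySem.Str.len, he])
    simp [PySem.Str.len, hne]
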